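-- pv_equiv track=rewrite | github.com/MadAnalysis/madanalysis5 | madanalysis/IOinterface/job_reader.py | ExtractStatisticsInt
-- ===== SOURCE A (Python) =====
-- from typing import Any, Callable, List, Tuple
--
-- def check_instance(instance: str, instance_type: Callable[[str], Any]) -> bool:
--     """
--     Check if a given instance can be converted to a desired type
--
--     Args:
--         instance (``str``): instance
--         instance_type (``Callable[[str], Any]``): type to be converted
--
--     Returns:
--         ``bool``:
--         Returns true if the instance is convertable.
--     """
--     try:
--         _ = instance_type(instance)
--         return True
--     except ValueError:
--         return False
--
-- def ExtractStatisticsInt(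
--     words: List[str], numline, filename
-- ) -> Tuple[List[int], List[int]]:
--     """
--     Extract integer values from list
--
--     Args:
--         words (``list[str]``): line inputs
--
--     Returns:
--         ``Tuple[List[int], List[int]]``:
--         positive and negative weights
--     """
--     # Collect positive weights
--     positive_weights, negative_weights = [], []
--     for idx, instance in enumerate(words):
--         if check_instance(instance, int):
--             if idx % 2 == 0:
--                 positive_weights.append(int(instance))
--             else:
--                 negative_weights.append(int(instance))
--
--     return positive_weights, negative_weights
-- ===== SOURCE B (Python) =====
-- from typing import Any, Callable, List, Tuple
--
--
-- def check_instance(instance: str, instance_type: Callable[[str], Any]) -> bool: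
--     try:
--         _ = instance_type(instance)
--         return True
--     except ValueError:
--         return False
--
--
-- def ExtractStatisticsInt(
--     words: List[str], numline, filename
-- ) -> Tuple[List[int], List[int]]:
--     # Even/odd original positions are exactly the two stride-2 slices:
--     # no index bookkeeping or parity branch needed.
--     positive_weights = [int(w) for w in words[0::2] if check_instance(w, int)]
--     negative_weights = [int(w) for w in words[1::2] if check_instance(w, int)]
--     return positive_weights, negative_weights
-- ===== Notes on version B (the rewrite author's own statement) =====
-- stated objective: simpler
-- what changed: Replaces the single enumerate loop with an idx % 2 branch and two appended accumulators by two independent stride-2 slices (words[0::2], words[1::2]), each turned into its list by one comprehension, eliminating the index bookkeeping and the parity test.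
import Mathlib
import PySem

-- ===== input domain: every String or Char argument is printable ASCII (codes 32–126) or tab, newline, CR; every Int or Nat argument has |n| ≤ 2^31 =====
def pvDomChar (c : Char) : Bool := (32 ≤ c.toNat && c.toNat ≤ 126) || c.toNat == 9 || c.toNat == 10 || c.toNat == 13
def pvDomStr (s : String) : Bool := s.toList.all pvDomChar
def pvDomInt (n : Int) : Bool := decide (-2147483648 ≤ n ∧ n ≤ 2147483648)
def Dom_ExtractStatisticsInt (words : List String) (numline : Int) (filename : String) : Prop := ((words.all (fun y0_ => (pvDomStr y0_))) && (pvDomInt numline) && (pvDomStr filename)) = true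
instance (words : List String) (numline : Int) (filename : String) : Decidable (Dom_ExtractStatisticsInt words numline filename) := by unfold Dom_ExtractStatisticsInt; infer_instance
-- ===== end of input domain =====

-- B replaces A's indexed loop with an idx % 2 branch by two stride-2 slices, each
-- converted with one comprehension; objective: simpler (same O(n) cost).

-- ===== PORT A =====
-- loop body of A: check_instance(w, int) followed by int(w) is one ofStr? match
-- (ofStr? is int(): some exactly where int() succeeds, none = ValueError).
def pvStepA (acc : List Int × List Int) (p : Int × String) : List Int × List Int :=
  match PySem.Int.ofStr? p.2 with
  | none => acc
  | some v => if PySem.Int.mod p.1 2 = 0 then (acc.1 ++ [v], acc.2) else (acc.1, acc.2 ++ [v])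

def ExtractStatisticsInt (words : List String) (numline : Int) (filename : String) : List Int × List Int :=
  (PySem.List.enumerate words 0).foldl pvStepA ([], [])

-- ===== PORT B =====
-- words[0::2] / words[1::2] are slice? with step 2 ≠ 0, hence always `some`; the
-- `.getD []` only discharges the Option and never fires.
def ExtractStatisticsInt_alt (words : List String) (numline : Int) (filename : String) : List Int × List Int :=
  (((PySem.List.slice? words (some 0) none 2).getD []).filterMap PySem.Int.ofStr?,
   ((PySem.List.slice? words (some 1) none 2).getD []).filterMap PySem.Int.ofStr?)

-- ===== PRECONDITION & SPEC =====
def Spec_ExtractStatisticsInt (words : List String) (numline : Int) (filename : String) (out : List Int × List Int) : Prop := out = ExtractStatisticsInt_alt words numline filename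
instance (words : List String) (numline : Int) (filename : String) (out : List Int × List Int) : Decidable (Spec_ExtractStatisticsInt words numline filename out) := by unfold Spec_ExtractStatisticsInt; infer_instance

-- ===== CLAIM (what is proved, stated in full; the proofs are below) =====
def Claim_equal_ExtractStatisticsInt : Prop := ∀ (words : List String) (numline : Int) (filename : String), Dom_ExtractStatisticsInt words numline filename → Spec_ExtractStatisticsInt words numline filename (ExtractStatisticsInt words numline filename)

-- ===== LEMMAS AND PROOFS =====

-- elements of xs at even positions
def pvEvens {α : Type} : List α → List α
  | [] => []
  | [x] => [x]
  | x :: _ :: t => x :: pvEvens t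

-- elements of xs at odd positions
def pvOdds {α : Type} : List α → List α
  | [] => []
  | [_] => []
  | _ :: y :: t => y :: pvOdds t

theorem pv_pair_ind {α : Type} (motive : List α → Prop) (h0 : motive [])
    (h1 : ∀ x, motive [x]) (h2 : ∀ x y t, motive t → motive (x :: y :: t)) :
    ∀ l : List α, motive l
  | [] => h0
  | [x] => h1 x
  | x :: y :: t => h2 x y t (pv_pair_ind motive h0 h1 h2 t)

theorem pv_filterMap_range_evens {α : Type} (xs : List α) :
    List.filterMap (fun k => xs[2 * k]?) (List.range ((xs.length + 1) / 2)) = pvEvens xs := by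
  induction xs using pv_pair_ind with
  | h0 => simp [pvEvens]
  | h1 x => simp [pvEvens]
  | h2 x y t ih =>
    have hlen : (x :: y :: t).length + 1 = ((t.length + 1) / 2 + 1) * 2 + (t.length + 1) % 2 := by
      simp; omega
    have hc : ((x :: y :: t).length + 1) / 2 = (t.length + 1) / 2 + 1 := by simp; omega
    rw [hc, List.range_succ_eq_map]
    simp only [List.filterMap_cons, List.filterMap_map]
    have hf : (fun k => (x :: y :: t)[2 * (k + 1)]?) = fun k : Nat => t[2 * k]? := by
      funext k
      have h2k : 2 * (k + 1) = 2 * k + 1 + 1 := by omega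
      rw [h2k]
      simp
    simp only [Function.comp_def, hf]
    simp [pvEvens, ih]


theorem pv_odds_cons {α : Type} (t : List α) : ∀ x, pvOdds (x :: t) = pvEvens t := by
  induction t using pv_pair_ind with
  | h0 => intro x; simp [pvOdds, pvEvens]
  | h1 y => intro x; simp [pvOdds, pvEvens]
  | h2 y z t ih => intro x; simp [pvOdds, pvEvens, ih z]

theorem pv_slice_even {α : Type} (xs : List α) :
    PySem.List.slice? xs (some 0) none 2 = some (pvEvens xs) := by
  rw [PySem.List.slice?]
  simp only [if_neg (by norm_num : ¬(2:Int) = 0)]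
  rw [PySem.List.sliceIndices]
  norm_num
  rw [← pv_filterMap_range_evens]
  have hc : (if 0 < xs.length then (((xs.length : Int) + 2 - 1) / 2).toNat else 0)
      = (xs.length + 1) / 2 := by split <;> omega
  rw [hc]
  apply List.filterMap_congr
  intro k _
  have h2k : (2 * (k : Int)).toNat = 2 * k := by omega
  rw [h2k]

theorem pv_slice_odd {α : Type} (xs : List α) :
    PySem.List.slice? xs (some 1) none 2 = some (pvOdds xs) := by
  cases xs with
  | nil => rfl
  | cons x t =>
    rw [PySem.List.slice?]
    simp only [if_neg (by norm_num : ¬(2:Int) = 0)]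
    rw [PySem.List.sliceIndices]
    norm_num
    rw [pv_odds_cons t x, ← pv_filterMap_range_evens]
    have hc : (if 0 < t.length then (((t.length : Int) + 2 - 1) / 2).toNat else 0)
        = (t.length + 1) / 2 := by split <;> omega
    rw [hc]
    apply List.filterMap_congr
    intro k _
    have h2k : (1 + 2 * (k : Int)).toNat = 2 * k + 1 := by omega
    rw [h2k]
    simp

theorem pv_foldA (t : List String) (s : Int) (hs : PySem.Int.mod s 2 = 0)
    (p n : List Int) :
    (PySem.List.enumerate t s).foldl pvStepA (p, n)
      = (p ++ (pvEvens t).filterMap PySem.Int.ofStr?,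
         n ++ (pvOdds t).filterMap PySem.Int.ofStr?) := by
  induction t using pv_pair_ind generalizing s p n with
  | h0 => simp [pvEvens, pvOdds]
  | h1 x =>
    have hd : (2 : Int) ∣ s := (PySem.Int.mod_eq_zero_iff_dvd s 2).mp hs
    simp only [PySem.List.enumerate_cons, PySem.List.enumerate_nil, List.foldl_cons,
      List.foldl_nil, pvStepA, pvEvens, pvOdds]
    cases h : PySem.Int.ofStr? x <;> simp [h, hd]
  | h2 x y t ih =>
    have hd : (2 : Int) ∣ s := (PySem.Int.mod_eq_zero_iff_dvd s 2).mp hs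
    have hnd1 : ¬ (2 : Int) ∣ (s + 1) := by omega
    have hs2 : PySem.Int.mod (s + 1 + 1) 2 = 0 :=
      (PySem.Int.mod_eq_zero_iff_dvd _ 2).mpr (by omega)
    simp only [PySem.List.enumerate_cons, List.foldl_cons]
    rw [ih (s + 1 + 1) hs2]
    simp only [pvStepA, pvEvens, pvOdds]
    cases hx : PySem.Int.ofStr? x <;> cases hy : PySem.Int.ofStr? y <;>
      simp [hx, hy, hd, hnd1]

-- ===== VERDICT (by name: the statement is the Claim_ definition above) =====
theorem ExtractStatisticsInt_spec : Claim_equal_ExtractStatisticsInt := by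
  intro words numline filename _
  unfold Spec_ExtractStatisticsInt ExtractStatisticsInt ExtractStatisticsInt_alt
  rw [pv_slice_even, pv_slice_odd, pv_foldA words 0 (by decide) [] []]
  simp
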